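-- pv_equiv track=rewrite | github.com/MrBrantCode/unitest_baseline | mut_generate/mist_train_taco/taco_13723/solution.py | is_valid_binary_string
-- ===== SOURCE A (Python) =====
-- def is_valid_binary_string(s: str) -> bool:
--     one_found = False
--     zero_found_after_one = False
--
--     for char in s:
--         if char == '1':
--             if zero_found_after_one:
--                 return False
--             one_found = True
--         elif char == '0':
--             if one_found:
--                 zero_found_after_one = True
--
--     return True
-- ===== SOURCE B (Python) =====
-- def is_valid_binary_string(s: str) -> bool:
--     t = ''.join(c for c in s if c in '01')
--     return '0' not in t.strip('0')
-- ===== Notes on version B (the rewrite author's own statement) =====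
-- stated objective: idiomatic
-- what changed: Replaces A's forward two-flag state machine with a derive-then-test approach: keep only the binary-digit characters, strip zero digits from both ends, and check that no zero digit remains (the binary subsequence must be zeros, then ones, then zeros).
import Mathlib
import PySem

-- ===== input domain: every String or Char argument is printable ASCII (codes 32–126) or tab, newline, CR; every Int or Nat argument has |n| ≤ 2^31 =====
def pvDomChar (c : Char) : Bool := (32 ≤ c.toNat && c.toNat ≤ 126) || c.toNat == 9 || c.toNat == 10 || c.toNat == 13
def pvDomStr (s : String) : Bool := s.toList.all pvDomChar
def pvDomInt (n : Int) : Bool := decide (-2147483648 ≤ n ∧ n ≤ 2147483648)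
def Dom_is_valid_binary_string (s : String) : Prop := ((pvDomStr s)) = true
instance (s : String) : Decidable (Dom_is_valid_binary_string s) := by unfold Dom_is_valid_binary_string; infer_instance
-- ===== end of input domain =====

-- B replaces A's forward two-flag state machine by: keep only '0'/'1' chars, strip zeros
-- from both ends, and return whether no '0' remains (idiomatic derive-then-test).

-- ===== PORT A =====
-- A's loop with its two flags (one_found, zero_found_after_one) and early 'return False'.
def pvLoopA : List Char → Bool → Bool → Bool
  | [], _, _ => true
  | c :: rest, one, z =>
    if c == '1' then
      if z then false else pvLoopA rest true z
    else if c == '0' then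
      if one then pvLoopA rest one true else pvLoopA rest one z
    else pvLoopA rest one z

def is_valid_binary_string (s : String) : Bool := pvLoopA s.toList false false

-- ===== PORT B =====
-- ''.join(c for c in s if c in '01'); strip('0') = drop leading and trailing '0's; '0' not in result.
def pvRStrip0 (l : List Char) : List Char := (l.reverse.dropWhile (fun c => c == '0')).reverse

def is_valid_binary_string_alt (s : String) : Bool :=
  let t := s.toList.filter (fun c => c == '0' || c == '1')
  let u := pvRStrip0 (t.dropWhile (fun c => c == '0'))
  !(u.contains '0')

-- ===== PRECONDITION & SPEC =====
def Spec_is_valid_binary_string (s : String) (out : Bool) : Prop := out = is_valid_binary_string_alt s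
instance (s : String) (out : Bool) : Decidable (Spec_is_valid_binary_string s out) := by unfold Spec_is_valid_binary_string; infer_instance

-- ===== CLAIM (what is proved, stated in full; the proofs are below) =====
def Claim_equal_is_valid_binary_string : Prop := ∀ (s : String), Dom_is_valid_binary_string s → Spec_is_valid_binary_string s (is_valid_binary_string s)

-- ===== LEMMAS AND PROOFS =====

-- A's loop ignores every character that is neither '0' nor '1'.
theorem pvLoopA_filter (l : List Char) (one z : Bool) :
    pvLoopA l one z = pvLoopA (l.filter (fun c => c == '0' || c == '1')) one z := by
  induction l generalizing one z with
  | nil => rfl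
  | cons c rest ih =>
    by_cases h1 : c = '1'
    · subst h1; simp [pvLoopA, List.filter]
      by_cases hz : z = true <;> simp [hz, ih]
    · by_cases h0 : c = '0'
      · subst h0; simp [pvLoopA, List.filter]
        by_cases ho : one = true <;> simp [ho, ih]
      · have hne : (c == '0' || c == '1') = false := by simp [h0, h1]
        simp [pvLoopA, List.filter, h1, h0, hne, ih]

-- Once zero_found_after_one is set, the loop succeeds iff no further '1' occurs.
theorem pvLoopA_z (l : List Char) (one : Bool) :
    pvLoopA l one true = !(l.contains '1') := by
  induction l generalizing one with
  | nil => rfl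
  | cons c rest ih =>
    by_cases h1 : c = '1'
    · subst h1; simp [pvLoopA]
    · by_cases h0 : c = '0'
      · subst h0
        simp only [pvLoopA]
        cases one <;> simp [ih]
      · have e1 : (c == '1') = false := by simp [h1]
        have e0 : (c == '0') = false := by simp [h0]
        simp only [pvLoopA, e1, e0]
        simp [ih]
        intro _ hq
        exact h1 hq.symm

theorem pvRStrip0_nil_iff (l : List Char) :
    pvRStrip0 l = [] ↔ ∀ c ∈ l, c = '0' := by
  simp [pvRStrip0, List.dropWhile_eq_nil_iff]

theorem pvRStrip0_cons (c : Char) (l : List Char) :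
    pvRStrip0 (c :: l) =
      if pvRStrip0 l = [] then (if c == '0' then [] else [c])
      else c :: pvRStrip0 l := by
  simp only [pvRStrip0, List.reverse_cons, List.dropWhile_append]
  by_cases h : l.reverse.dropWhile (fun c => c == '0') = []
  · rw [h]
    simp only [List.isEmpty_nil, if_true, List.reverse_eq_nil_iff]
    by_cases hc : c = '0'
    · subst hc; simp [List.dropWhile]
    · have : (c == '0') = false := by simp [hc]
      simp [List.dropWhile, this]
  · have hne : (l.reverse.dropWhile (fun c => c == '0')).isEmpty = false := by
      simpa [List.isEmpty_iff] using h
    have hif : ¬ (List.dropWhile (fun c => c == '0') l.reverse).reverse = [] := by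
      simpa [List.reverse_eq_nil_iff] using h
    rw [if_neg hif, hne]
    simp

-- In state (one_found = true, z = false), the loop succeeds iff after stripping
-- trailing zeros no '0' remains (binary input).
theorem pvLoopA_one (l : List Char) (hb : ∀ c ∈ l, c = '0' ∨ c = '1') :
    pvLoopA l true false = !((pvRStrip0 l).contains '0') := by
  induction l with
  | nil => rfl
  | cons c rest ih =>
    have hbr : ∀ x ∈ rest, x = '0' ∨ x = '1' := fun x hx => hb x (List.mem_cons_of_mem _ hx)
    rcases hb c List.mem_cons_self with h0 | h1
    · subst h0
      have hstep : pvLoopA ('0' :: rest) true false = pvLoopA rest true true := by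
        simp [pvLoopA]
      rw [hstep, pvLoopA_z, pvRStrip0_cons]
      by_cases hnil : pvRStrip0 rest = []
      · simp only [hnil, if_true]
        rw [pvRStrip0_nil_iff] at hnil
        simp only [show (('0' : Char) == '0') = true by decide, if_true]
        simp only [List.contains_nil, Bool.not_false]
        simp only [Bool.not_eq_true', List.contains_eq_mem, decide_eq_false_iff_not]
        intro h1m
        have := hnil _ h1m
        exact absurd this (by decide)
      · simp only [hnil, if_false]
        rw [pvRStrip0_nil_iff] at hnil
        simp only [not_forall, exists_prop] at hnil
        obtain ⟨x, hxm, hx0⟩ := hnil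
        have hx1 : x = '1' := (hbr x hxm).resolve_left hx0
        subst hx1
        have hmem : '1' ∈ rest := hxm
        simp [List.contains_eq_mem, hmem]
    · subst h1
      have hstep : pvLoopA ('1' :: rest) true false = pvLoopA rest true false := by
        simp [pvLoopA]
      rw [hstep, ih hbr, pvRStrip0_cons]
      by_cases hnil : pvRStrip0 rest = []
      · simp [hnil]
      · simp [hnil]

-- In the initial state, leading zeros are skipped.
theorem pvLoopA_main (l : List Char) (hb : ∀ c ∈ l, c = '0' ∨ c = '1') :
    pvLoopA l false false =
      !((pvRStrip0 (l.dropWhile (fun c => c == '0'))).contains '0') := by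
  induction l with
  | nil => rfl
  | cons c rest ih =>
    have hbr : ∀ x ∈ rest, x = '0' ∨ x = '1' := fun x hx => hb x (List.mem_cons_of_mem _ hx)
    rcases hb c List.mem_cons_self with h0 | h1
    · subst h0
      have hstep : pvLoopA ('0' :: rest) false false = pvLoopA rest false false := by
        simp [pvLoopA]
      have hdrop : ('0' :: rest).dropWhile (fun c => c == '0') =
          rest.dropWhile (fun c => c == '0') := by
        simp [List.dropWhile]
      rw [hstep, hdrop, ih hbr]
    · subst h1
      have hstep : pvLoopA ('1' :: rest) false false = pvLoopA rest true false := by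
        simp [pvLoopA]
      have hdrop : ('1' :: rest).dropWhile (fun c => c == '0') = '1' :: rest := by
        simp [List.dropWhile]
      rw [hstep, hdrop, pvLoopA_one rest hbr, pvRStrip0_cons]
      by_cases hnil : pvRStrip0 rest = []
      · simp [hnil]
      · simp [hnil]

-- ===== VERDICT (by name: the statement is the Claim_ definition above) =====
theorem is_valid_binary_string_spec : Claim_equal_is_valid_binary_string := by
  intro s _
  unfold Spec_is_valid_binary_string is_valid_binary_string is_valid_binary_string_alt
  rw [pvLoopA_filter]
  apply pvLoopA_main
  intro c hc
  have := List.of_mem_filter hc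
  rcases (by simpa using this : c = '0' ∨ c = '1') with h | h <;> simp [h]
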